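-- pv_equiv track=rewrite | github.com/lightsweeper/lightsweeper | Colors.py | rgbToSegments
-- ===== SOURCE A (Python) =====
-- RED = 1
--
-- GREEN = 2
--
-- YELLOW = 3
--
-- BLUE = 4
--
-- MAGENTA = 5
--
-- CYAN = 6
--
-- WHITE = 7
--
-- SEGMENTMASK = [64,32,16,8,4,2,1]
--
-- def unpack(b):
-- # Unpacks an int's binary flags
--     while b:
--         o = b&(~b+1)
--         yield o
--         b ^= o
--
-- def rgbToSegments(rgb):
--     segments = [None] * 7
--     for r in unpack(rgb[0]):
--         segments[SEGMENTMASK.index(r)] = RED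
--     for g in unpack(rgb[1]):
--         if segments[SEGMENTMASK.index(g)] is RED:
--             segments[SEGMENTMASK.index(g)] = YELLOW
--         else:
--             segments[SEGMENTMASK.index(g)] = GREEN
--     for b in unpack(rgb[2]):
--         if segments[SEGMENTMASK.index(b)] is YELLOW:
--             segments[SEGMENTMASK.index(b)] = WHITE
--         elif segments[SEGMENTMASK.index(b)] is GREEN:
--             segments[SEGMENTMASK.index(b)] = CYAN
--         elif segments[SEGMENTMASK.index(b)] is RED:
--             segments[SEGMENTMASK.index(b)] = MAGENTA
--         else:
--             segments[SEGMENTMASK.index(b)] = BLUE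
--     return(segments)
-- ===== SOURCE B (Python) =====
-- SEGMENTMASK = [64, 32, 16, 8, 4, 2, 1]
-- RED = 1
-- GREEN = 2
-- BLUE = 4
--
-- def rgbToSegments(rgb):
--     # One pass over the 7 segment positions: each segment's color code is the
--     # sum of the channel codes whose bitmask has that segment's bit set
--     # (RED=1, GREEN=2, BLUE=4 compose to all codes 1..7); 0 means unlit (None).
--     r, g, b = rgb[0], rgb[1], rgb[2]
--     return [RED * bool(m & r) + GREEN * bool(m & g) + BLUE * bool(m & b) or None
--             for m in SEGMENTMASK]
-- ===== Notes on version B (the rewrite author's own statement) =====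
-- stated objective: simpler
-- what changed: Replaces A's three sequential bit-unpacking passes (generator + SEGMENTMASK.index lookups + stateful color promotion) by one pass over the 7 segment positions that sums RED/GREEN/BLUE channel contributions per segment, since the codes 1/2/4 compose additively to all of 1..7.
import Mathlib
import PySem

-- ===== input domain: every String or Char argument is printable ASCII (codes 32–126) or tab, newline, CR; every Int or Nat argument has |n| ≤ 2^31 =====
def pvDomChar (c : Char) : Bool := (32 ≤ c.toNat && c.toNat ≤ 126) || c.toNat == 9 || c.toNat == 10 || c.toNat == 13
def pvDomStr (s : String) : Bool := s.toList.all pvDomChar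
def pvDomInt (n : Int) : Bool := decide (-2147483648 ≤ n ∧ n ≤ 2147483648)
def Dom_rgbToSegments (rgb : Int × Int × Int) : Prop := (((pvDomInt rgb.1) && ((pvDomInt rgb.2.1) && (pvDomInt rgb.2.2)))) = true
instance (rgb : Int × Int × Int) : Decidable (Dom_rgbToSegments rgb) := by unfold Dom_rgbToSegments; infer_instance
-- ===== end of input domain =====

-- B replaces A's three bit-unpacking passes with one arithmetic pass over the 7
-- segment positions (simpler); return values agree on Pre_ (channels in 0..127).

-- ===== PORT A =====

def SEGMENTMASK : List Int := [64, 32, 16, 8, 4, 2, 1]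

-- Python's `unpack` generator, collected into a list.  The fuel `b.natAbs + 1`
-- (supplied at the call site) exceeds the popcount of any b ≥ 0, so it never
-- runs out on inputs where the Python loop terminates; for b < 0 the Python
-- generator never terminates (outside Pre_).
def unpackF : Nat → Int → List Int
  | 0, _ => []
  | fuel + 1, b =>
      if b ≠ 0 then
        let o := PySem.Int.band b (Int.not b + 1)
        o :: unpackF fuel (PySem.Int.bxor b o)
      else []

def unpack (b : Int) : List Int := unpackF (b.natAbs + 1) b

-- segments[SEGMENTMASK.index(v)] = upd(segments[SEGMENTMASK.index(v)]).
-- When `index?` is none Python raises ValueError (outside Pre_); we return the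
-- state unchanged there.
def aStep (upd : Option Int → Option Int) (s : List (Option Int)) (v : Int) :
    List (Option Int) :=
  match PySem.List.index? SEGMENTMASK v with
  | some i => s.set i (upd (s.getD i none))
  | none => s

def rgbToSegments (rgb : Int × Int × Int) : List (Option Int) :=
  let segments := List.replicate 7 (none : Option Int)
  let segments := (unpack rgb.1).foldl
      (aStep (fun _ => some 1)) segments                       -- RED
  let segments := (unpack rgb.2.1).foldl
      (aStep (fun v => if v = some 1 then some 3 else some 2)) segments
  (unpack rgb.2.2).foldl
      (aStep (fun v =>
        if v = some 3 then some 7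
        else if v = some 2 then some 6
        else if v = some 1 then some 5
        else some 4)) segments

-- ===== PORT B =====
def rgbToSegments_alt (rgb : Int × Int × Int) : List (Option Int) :=
  SEGMENTMASK.map (fun m =>
    let code : Int :=
      1 * (if PySem.Int.band m rgb.1 ≠ 0 then 1 else 0)
      + 2 * (if PySem.Int.band m rgb.2.1 ≠ 0 then 1 else 0)
      + 4 * (if PySem.Int.band m rgb.2.2 ≠ 0 then 1 else 0)
    if code = 0 then none else some code)

-- ===== PRECONDITION & SPEC =====
-- Pre_ excludes exactly the inputs on which Python A does not return: a channel
-- value > 127 makes SEGMENTMASK.index raise ValueError, and a negative channel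
-- makes the `unpack` while-loop run forever.
def Pre_rgbToSegments (rgb : Int × Int × Int) : Prop :=
  0 ≤ rgb.1 ∧ rgb.1 ≤ 127 ∧ 0 ≤ rgb.2.1 ∧ rgb.2.1 ≤ 127 ∧ 0 ≤ rgb.2.2 ∧ rgb.2.2 ≤ 127
instance (rgb : Int × Int × Int) : Decidable (Pre_rgbToSegments rgb) := by
  unfold Pre_rgbToSegments; infer_instance

def pvWitness_rgbToSegments : (Int × Int × Int) := (65, 3, 7)

def Spec_rgbToSegments (rgb : Int × Int × Int) (out : List (Option Int)) : Prop := out = rgbToSegments_alt rgb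
instance (rgb : Int × Int × Int) (out : List (Option Int)) : Decidable (Spec_rgbToSegments rgb out) := by unfold Spec_rgbToSegments; infer_instance

-- ===== CLAIM (what is proved, stated in full; the proofs are below) =====
def Claim_equal_rgbToSegments : Prop := ∀ (rgb : Int × Int × Int), Dom_rgbToSegments rgb → Pre_rgbToSegments rgb → Spec_rgbToSegments rgb (rgbToSegments rgb)

-- ===== LEMMAS AND PROOFS =====

-- `unpack` on 0 ≤ b < 128 yields exactly the set bits, lowest first.
theorem unpack_char : ∀ n : Nat, n < 128 →
    unpack (n : Int) =
      [1, 2, 4, 8, 16, 32, 64].filter (fun o => PySem.Int.band (n : Int) o != 0) := by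
  decide

-- Folding one of A's update passes over the set bits of a mask list equals a
-- pointwise conditional update (stated with the 7 segment cells explicit).
theorem fold_step (upd : Option Int → Option Int) (p : Int → Bool)
    (a0 a1 a2 a3 a4 a5 a6 : Option Int) :
    List.foldl (aStep upd) [a0, a1, a2, a3, a4, a5, a6]
        ([1, 2, 4, 8, 16, 32, 64].filter p) =
      [if p 64 then upd a0 else a0, if p 32 then upd a1 else a1,
       if p 16 then upd a2 else a2, if p 8 then upd a3 else a3,
       if p 4 then upd a4 else a4, if p 2 then upd a5 else a5,
       if p 1 then upd a6 else a6] := by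
  cases h1 : p 1 <;> cases h2 : p 2 <;> cases h4 : p 4 <;> cases h8 : p 8 <;>
    cases h16 : p 16 <;> cases h32 : p 32 <;> cases h64 : p 64 <;>
    simp [List.filter, h1, h2, h4, h8, h16, h32, h64, aStep, SEGMENTMASK,
      PySem.List.index?] <;> rfl

-- A's three stacked cell updates equal B's additive cell formula (8 cases).
theorem cell (rb gb bb : Bool) :
    (let v1 := if rb then some (1 : Int) else none
     let v2 := if gb then (if v1 = some 1 then some 3 else some 2) else v1
     if bb then
       (if v2 = some 3 then some 7
        else if v2 = some 2 then some 6
        else if v2 = some 1 then some 5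
        else some 4)
     else v2) =
    (let code : Int := 1 * (if rb then 1 else 0) + 2 * (if gb then 1 else 0)
        + 4 * (if bb then 1 else 0)
     if code = 0 then none else some code) := by
  cases rb <;> cases gb <;> cases bb <;> rfl

theorem main_eq (r g b : Int) (hr0 : 0 ≤ r) (hr1 : r ≤ 127) (hg0 : 0 ≤ g)
    (hg1 : g ≤ 127) (hb0 : 0 ≤ b) (hb1 : b ≤ 127) :
    rgbToSegments (r, g, b) = rgbToSegments_alt (r, g, b) := by
  obtain ⟨nr, rfl⟩ : ∃ n : Nat, r = (n : Int) := ⟨r.toNat, (Int.toNat_of_nonneg hr0).symm⟩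
  obtain ⟨ng, rfl⟩ : ∃ n : Nat, g = (n : Int) := ⟨g.toNat, (Int.toNat_of_nonneg hg0).symm⟩
  obtain ⟨nb, rfl⟩ : ∃ n : Nat, b = (n : Int) := ⟨b.toNat, (Int.toNat_of_nonneg hb0).symm⟩
  have hnr : nr < 128 := by exact_mod_cast Int.lt_add_one_of_le hr1
  have hng : ng < 128 := by exact_mod_cast Int.lt_add_one_of_le hg1
  have hnb : nb < 128 := by exact_mod_cast Int.lt_add_one_of_le hb1
  show rgbToSegments ((nr : Int), (ng : Int), (nb : Int)) = _
  rw [rgbToSegments]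
  simp only [unpack_char _ hnr, unpack_char _ hng, unpack_char _ hnb]
  have h0 : List.replicate 7 (none : Option Int) =
      [none, none, none, none, none, none, none] := rfl
  rw [h0, fold_step, fold_step, fold_step]
  rw [rgbToSegments_alt]
  simp only [SEGMENTMASK, List.map_cons, List.map_nil]
  have key : ∀ m : Int,
      (let v1 := if (PySem.Int.band (nr : Int) m != 0) then some (1 : Int) else none
       let v2 := if (PySem.Int.band (ng : Int) m != 0) then (if v1 = some 1 then some 3 else some 2) else v1
       if (PySem.Int.band (nb : Int) m != 0) then
         (if v2 = some 3 then some 7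
          else if v2 = some 2 then some 6
          else if v2 = some 1 then some 5
          else some 4)
       else v2) =
      (let code : Int := 1 * (if PySem.Int.band m (nr : Int) ≠ 0 then 1 else 0)
          + 2 * (if PySem.Int.band m (ng : Int) ≠ 0 then 1 else 0)
          + 4 * (if PySem.Int.band m (nb : Int) ≠ 0 then 1 else 0)
       if code = 0 then none else some code) := by
    intro m
    have e1 : (PySem.Int.band m (nr : Int) ≠ 0) = (PySem.Int.band (nr : Int) m ≠ 0) := by rw [PySem.Int.band_comm]
    have e2 : (PySem.Int.band m (ng : Int) ≠ 0) = (PySem.Int.band (ng : Int) m ≠ 0) := by rw [PySem.Int.band_comm]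
    have e3 : (PySem.Int.band m (nb : Int) ≠ 0) = (PySem.Int.band (nb : Int) m ≠ 0) := by rw [PySem.Int.band_comm]
    simp only [e1, e2, e3, bne_iff_ne]
    simpa using cell (decide (PySem.Int.band (nr : Int) m ≠ 0)) (decide (PySem.Int.band (ng : Int) m ≠ 0))
      (decide (PySem.Int.band (nb : Int) m ≠ 0))
  simp only [← key]

-- ===== VERDICT (by name: the statement is the Claim_ definition above) =====
theorem rgbToSegments_spec : Claim_equal_rgbToSegments := by
  intro ⟨r, g, b⟩ _ ⟨hr0, hr1, hg0, hg1, hb0, hb1⟩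
  exact main_eq r g b hr0 hr1 hg0 hg1 hb0 hb1
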